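-- pv_equiv track=rewrite | github.com/Kridtity/tafe-projects | network scripting lab 7.py | find
-- ===== SOURCE A (Python) =====
-- def find(string, regex):
--     if len(regex) <= len(string):
--         for i in range(len(string)):
--             if regex == string[: (len(regex) + 1)]:
--                 return True
--             else:
--                 string = string[1:]
--         return False
--     else:
--         return False
-- ===== SOURCE B (Python) =====
-- def find(string, regex):
--     if len(regex) > len(string):
--         return False
--     return string[len(string) - len(regex):] == regex
-- ===== Notes on version B (the rewrite author's own statement) =====
-- stated objective: faster
-- what changed: Replaces A's shift-and-rescan loop (re-slicing the string and comparing a prefix at every shift) with a single loop-free suffix-slice comparison guarded by one length check.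
-- intended difference: For an empty regex A returns False (its loop can never match an empty pattern against a 1-char prefix slice), while B returns True, the intended value since every string ends with the empty string. — e.g. on find("ab", ""): A returns false, B returns true
import Mathlib
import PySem

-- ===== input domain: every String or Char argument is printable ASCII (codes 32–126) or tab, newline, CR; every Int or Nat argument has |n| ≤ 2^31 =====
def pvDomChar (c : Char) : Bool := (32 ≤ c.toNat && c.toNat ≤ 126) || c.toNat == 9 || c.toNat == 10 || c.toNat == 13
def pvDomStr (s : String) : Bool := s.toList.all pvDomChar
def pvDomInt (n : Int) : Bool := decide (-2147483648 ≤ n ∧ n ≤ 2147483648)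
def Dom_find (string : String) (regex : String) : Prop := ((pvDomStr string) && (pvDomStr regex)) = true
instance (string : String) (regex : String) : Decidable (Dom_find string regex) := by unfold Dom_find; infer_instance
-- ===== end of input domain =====

-- B replaces A's shift-and-rescan loop by one guarded suffix-slice comparison (no loop);
-- on the empty regex B returns true where A returns false (see D_find).

-- ===== PORT A =====
-- the for-loop: 'string' is rebound to string[1:] each iteration; fuel = range(len(string)) length
def findLoop (regex : String) (string : String) : Nat → Bool
  | 0 => false
  | n + 1 =>
    if regex == PySem.Str.slice string none (some (PySem.Str.len regex + 1)) then true
    else findLoop regex (PySem.Str.slice string (some 1) none) n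

def find (string : String) (regex : String) : Bool :=
  if PySem.Str.len regex ≤ PySem.Str.len string then
    findLoop regex string (PySem.Str.len string).toNat
  else false

-- ===== PORT B =====
def find_alt (string : String) (regex : String) : Bool :=
  if PySem.Str.len regex > PySem.Str.len string then false
  else PySem.Str.slice string (some (PySem.Str.len string - PySem.Str.len regex)) none == regex

-- ===== PRECONDITION & SPEC =====
-- On an empty regex A returns False (its loop can never match the empty pattern against a
-- 1-char prefix slice), while B returns True, the intended value: every string ends with "".
def D_find (string : String) (regex : String) : Prop := regex = ""
instance (string : String) (regex : String) : Decidable (D_find string regex) := by unfold D_find; infer_instance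

def Spec_find (string : String) (regex : String) (out : Bool) : Prop := ¬ D_find string regex → out = find_alt string regex
instance (string : String) (regex : String) (out : Bool) : Decidable (Spec_find string regex out) := by unfold Spec_find; infer_instance

def pvDiffWitness_find : String × String := ("ab", "")
def pvDiffWitnessOut_find : Bool × Bool := (false, true)

-- ===== CLAIM (what is proved, stated in full; the proofs are below) =====
def Claim_unchanged_find : Prop := ∀ (string : String) (regex : String), Dom_find string regex → Spec_find string regex (find string regex)
def Claim_changed_find : Prop := Dom_find (pvDiffWitness_find.1) (pvDiffWitness_find.2) ∧ D_find (pvDiffWitness_find.1) (pvDiffWitness_find.2) ∧ find (pvDiffWitness_find.1) (pvDiffWitness_find.2) = pvDiffWitnessOut_find.1 ∧ find_alt (pvDiffWitness_find.1) (pvDiffWitness_find.2) = pvDiffWitnessOut_find.2 ∧ pvDiffWitnessOut_find.1 ≠ pvDiffWitnessOut_find.2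
def Claim_exact_find : Prop := ∀ (string : String) (regex : String), Dom_find string regex → D_find string regex → find string regex ≠ find_alt string regex

-- ===== LEMMAS AND PROOFS =====

lemma take_succ_self_iff (r s : List Char) : r = s.take (r.length + 1) ↔ s = r := by
  constructor
  · intro h
    have hl : r.length = min (r.length + 1) s.length := by
      conv_lhs => rw [h]
      simp
    have : s.take (r.length + 1) = s := List.take_of_length_le (by omega)
    rw [this] at h
    exact h.symm
  · intro h
    subst h
    exact (List.take_of_length_le (by omega)).symm

lemma beq_slice_iff (r s : String) :
    (r == PySem.Str.slice s none (some (PySem.Str.len r + 1))) = true ↔ s.toList = r.toList := by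
  rw [beq_iff_eq, ← String.toList_inj, PySem.Str.toList_slice,
    PySem.Chars.slice_eq_listSlice, PySem.Str.len_eq,
    PySem.List.slice_to _ (by positivity)]
  have h1 : ((r.toList.length : Int) + 1).toNat = r.toList.length + 1 := by omega
  rw [h1]
  exact take_succ_self_iff _ _

lemma tail_toList (s : String) :
    (PySem.Str.slice s (some 1) none).toList = s.toList.drop 1 := by
  rw [PySem.Str.toList_slice, PySem.Chars.slice_eq_listSlice,
    PySem.List.slice_from_one, ← List.drop_one]

lemma findLoop_eq (regex : String) (n : Nat) : ∀ (s : String),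
    findLoop regex s n = decide (∃ k < n, s.toList.drop k = regex.toList) := by
  induction n with
  | zero => intro s; simp [findLoop]
  | succ n ih =>
    intro s
    rw [findLoop]
    by_cases h : (regex == PySem.Str.slice s none (some (PySem.Str.len regex + 1))) = true
    · rw [if_pos h]
      have hs : s.toList = regex.toList := (beq_slice_iff _ _).mp h
      symm
      simp only [decide_eq_true_iff]
      exact ⟨0, by omega, by simpa using hs⟩
    · rw [if_neg h, ih, tail_toList]
      have hs : s.toList ≠ regex.toList := fun hc => h ((beq_slice_iff _ _).mpr hc)
      simp only [List.drop_drop, decide_eq_decide]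
      constructor
      · rintro ⟨k, hk, hd⟩
        exact ⟨k + 1, by omega, by simpa [Nat.add_comm] using hd⟩
      · rintro ⟨k, hk, hd⟩
        match k with
        | 0 => exact absurd (by simpa using hd) hs
        | k + 1 => exact ⟨k, by omega, by simpa [Nat.add_comm] using hd⟩

lemma empty_iff_toList (r : String) : r = "" ↔ r.toList = [] := by
  rw [← String.toList_inj]; simp

-- ===== VERDICT (by name: the statement is the Claim_ definition above) =====
theorem find_spec : Claim_unchanged_find := by
  intro string regex _
  unfold Spec_find find find_alt
  intro hD
  have hre : regex.toList ≠ [] := fun hc => hD ((empty_iff_toList _).mpr hc)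
  simp only [PySem.Str.len_eq]
  have hr1 : 1 ≤ regex.toList.length := by
    cases hl : regex.toList with
    | nil => exact absurd hl hre
    | cons a t => simp
  by_cases hlen : ((regex.toList.length : Int)) ≤ ((string.toList.length : Int))
  · rw [if_pos hlen, if_neg (by omega)]
    rw [show ((string.toList.length : Int)).toNat = string.toList.length from by omega, findLoop_eq]
    have hsl : (PySem.Str.slice string
          (some ((string.toList.length : Int) - (regex.toList.length : Int))) none).toList
        = string.toList.drop (string.toList.length - regex.toList.length) := by
      rw [PySem.Str.toList_slice, PySem.Chars.slice_eq_listSlice,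
        PySem.List.slice_from _ (by omega)]
      congr 1
      omega
    by_cases hb : (PySem.Str.slice string
        (some ((string.toList.length : Int) - (regex.toList.length : Int))) none == regex) = true
    · rw [hb]
      have hd : string.toList.drop (string.toList.length - regex.toList.length) = regex.toList := by
        rw [← hsl]
        exact String.toList_inj.mpr (beq_iff_eq.mp hb)
      simp only [decide_eq_true_iff]
      exact ⟨string.toList.length - regex.toList.length, by omega, hd⟩
    · rw [Bool.eq_false_iff.mpr hb]
      simp only [decide_eq_false_iff_not]
      rintro ⟨k, hk, hd⟩
      have hklen : string.toList.length - k = regex.toList.length := by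
        rw [← hd]
        simp
      apply hb
      rw [beq_iff_eq, ← String.toList_inj, hsl,
        show string.toList.length - regex.toList.length = k from by omega]
      exact hd
  · rw [if_neg hlen, if_pos (by omega)]

theorem find_changed : Claim_changed_find := by unfold Claim_changed_find; decide

theorem find_tight : Claim_exact_find := by
  intro string regex _ hD
  unfold find find_alt
  have hr0 : regex.toList = [] := (empty_iff_toList _).mp hD
  simp only [PySem.Str.len_eq, hr0]
  rw [if_pos (by simp), if_neg (by simp)]
  rw [show ((string.toList.length : Int)).toNat = string.toList.length from by omega, findLoop_eq]
  have hA : (decide (∃ k < string.toList.length, string.toList.drop k = regex.toList)) = false := by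
    simp only [decide_eq_false_iff_not]
    rintro ⟨k, hk, hd⟩
    rw [hr0, List.drop_eq_nil_iff] at hd
    omega
  rw [hA]
  have hB : (PySem.Str.slice string
      (some ((string.toList.length : Int) - (([] : List Char).length : Int))) none == regex) = true := by
    rw [beq_iff_eq, ← String.toList_inj, PySem.Str.toList_slice,
      PySem.Chars.slice_eq_listSlice, PySem.List.slice_from _ (by simp), hr0]
    simp
  intro hc
  rw [hB] at hc
  exact Bool.false_ne_true hc
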